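-- pv_equiv track=rewrite | github.com/diaoyuqiang/python | leecode刷题/leecode16.py | beer
-- ===== SOURCE A (Python) =====
-- def beer(money):
--     s = 0
--     for i in range(1, money+1):
--         if i % 5 == 0:
--             s += 1
--             if s % 5 == 0:
--                 s += 1
--     return s
-- ===== SOURCE B (Python) =====
-- def beer(money):
--     # Closed form: the loop's s after m multiples of 5 is the m-th positive
--     # integer not divisible by 5, i.e. m + (m-1)//4.
--     m = money // 5
--     if m <= 0:
--         return 0
--     return m + (m - 1) // 4
-- ===== Notes on version B (the rewrite author's own statement) =====
-- stated objective: faster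
-- what changed: Replaced the O(money) counting loop by the closed form m + (m-1)//4 with m = money//5, since the running total is the m-th positive integer not divisible by 5.
import Mathlib
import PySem

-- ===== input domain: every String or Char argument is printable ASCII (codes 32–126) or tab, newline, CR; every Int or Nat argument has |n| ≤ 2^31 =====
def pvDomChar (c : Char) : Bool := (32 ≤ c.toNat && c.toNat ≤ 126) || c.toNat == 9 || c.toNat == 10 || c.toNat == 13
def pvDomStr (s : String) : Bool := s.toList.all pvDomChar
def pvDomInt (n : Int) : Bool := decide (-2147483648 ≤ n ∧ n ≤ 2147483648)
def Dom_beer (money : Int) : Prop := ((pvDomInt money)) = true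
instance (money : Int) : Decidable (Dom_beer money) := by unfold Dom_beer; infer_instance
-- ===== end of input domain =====

-- B replaces the O(money) counting loop by the O(1) closed form m + (m-1)//4, m = money//5.

-- ===== PORT A =====
-- loop body of A: for each i, if i % 5 == 0 then s += 1 and bump again when s hits a multiple of 5
def beerStep (s : Int) (i : Int) : Int :=
  if PySem.Int.mod i 5 == 0 then
    (let s' := s + 1
     if PySem.Int.mod s' 5 == 0 then s' + 1 else s')
  else s

def beer (money : Int) : Int :=
  (PySem.List.pyRange 1 (money + 1) 1).foldl beerStep 0

-- ===== PORT B =====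
def beer_alt (money : Int) : Int :=
  let m := PySem.Int.floordiv money 5
  if m ≤ 0 then 0 else m + PySem.Int.floordiv (m - 1) 4

-- ===== PRECONDITION & SPEC =====
def Spec_beer (money : Int) (out : Int) : Prop := out = beer_alt money
instance (money : Int) (out : Int) : Decidable (Spec_beer money out) := by unfold Spec_beer; infer_instance

-- ===== CLAIM (what is proved, stated in full; the proofs are below) =====
def Claim_equal_beer : Prop := ∀ (money : Int), Dom_beer money → Spec_beer money (beer money)

-- ===== LEMMAS AND PROOFS =====

-- closed form over Nat: value of A's running total after scanning 1..n
def beerNat (n : Nat) : Int :=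
  if n / 5 = 0 then 0 else ((n / 5 : Nat) : Int) + (((n / 5 - 1) / 4 : Nat) : Int)

lemma bump_div4 (m : Nat) (h : 1 ≤ m) (hb : (m + (m-1)/4 + 1) % 5 = 0) :
    m/4 = (m-1)/4 + 1 := by omega

lemma nobump_div4 (m : Nat) (h : 1 ≤ m) (hb : (m + (m-1)/4 + 1) % 5 ≠ 0) :
    m/4 = (m-1)/4 := by omega

lemma beerStep_beerNat (n : Nat) : beerStep (beerNat n) ((n : Int) + 1) = beerNat (n + 1) := by
  by_cases hn4 : n = 4
  · subst hn4; decide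
  unfold beerStep beerNat
  have hmod : PySem.Int.mod ((n : Int) + 1) 5 = (((n + 1) % 5 : Nat) : Int) := by
    exact_mod_cast PySem.Int.mod_natCast (n + 1) 5
  rw [hmod]
  by_cases h5 : (n + 1) % 5 = 0
  · have hm : (n + 1) / 5 = n / 5 + 1 := by omega
    have h0 : ¬ n / 5 = 0 := by omega
    simp only [h5, Nat.cast_zero, beq_self_eq_true, if_true, hm, h0, if_false,
      if_neg (by omega : ¬ n / 5 + 1 = 0), Nat.add_sub_cancel]
    have hs : (((n / 5 : Nat) : Int) + (((n / 5 - 1) / 4 : Nat) : Int)) + 1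
        = (((n / 5 + (n / 5 - 1) / 4 + 1 : Nat)) : Int) := by push_cast; ring
    rw [hs]
    have hmod2 : PySem.Int.mod ((n / 5 + (n / 5 - 1) / 4 + 1 : Nat) : Int) 5
        = (((n / 5 + (n / 5 - 1) / 4 + 1) % 5 : Nat) : Int) := by
      exact_mod_cast PySem.Int.mod_natCast _ 5
    rw [hmod2]
    by_cases hb : (n / 5 + (n / 5 - 1) / 4 + 1) % 5 = 0
    · rw [bump_div4 (n / 5) (by omega) hb]
      simp only [hb, Nat.cast_zero, beq_self_eq_true, if_true]
      push_cast
      ring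
    · rw [nobump_div4 (n / 5) (by omega) hb]
      rw [if_neg (by simp; omega)]
      push_cast
      ring
  · have hne : ((((n + 1) % 5 : Nat) : Int) == 0) = false := by simp; omega
    have heq : (n + 1) / 5 = n / 5 := by omega
    simp only [hne, Bool.false_eq_true, if_false, heq]

lemma beer_natCast (n : Nat) : beer ((n : Int)) = beerNat n := by
  induction n with
  | zero =>
    simp [beer, beerNat]
  | succ k ih =>
    have hsplit : PySem.List.pyRange 1 (((k : Int) + 1) + 1) 1
        = PySem.List.pyRange 1 ((k : Int) + 1) 1 ++ [(k : Int) + 1] := by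
      exact PySem.List.pyRange_one_succ_right (by omega)
    unfold beer
    push_cast
    rw [hsplit, List.foldl_append]
    have : (PySem.List.pyRange 1 ((k : Int) + 1) 1).foldl beerStep 0 = beerNat k := by
      have := ih
      unfold beer at this
      exact this
    rw [this]
    simp only [List.foldl_cons, List.foldl_nil]
    exact beerStep_beerNat k

lemma beer_alt_natCast (n : Nat) : beer_alt ((n : Int)) = beerNat n := by
  unfold beer_alt beerNat
  have h1 : PySem.Int.floordiv ((n : Int)) 5 = (((n / 5 : Nat)) : Int) := by
    exact_mod_cast PySem.Int.floordiv_natCast n 5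
  rw [h1]
  by_cases h0 : n / 5 = 0
  · simp [h0]
  · have hpos : 0 < n / 5 := Nat.pos_of_ne_zero h0
    have hle : ¬ (((n / 5 : Nat) : Int) ≤ 0) := by omega
    simp only [hle, if_false, h0, if_false]
    have h2 : ((n / 5 : Nat) : Int) - 1 = (((n / 5 - 1 : Nat)) : Int) := by
      push_cast [Nat.cast_sub (by omega : 1 ≤ n / 5)]; ring
    rw [h2]
    have h3 : PySem.Int.floordiv (((n / 5 - 1 : Nat)) : Int) 4 = (((n / 5 - 1) / 4 : Nat) : Int) := by
      exact_mod_cast PySem.Int.floordiv_natCast (n / 5 - 1) 4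
    rw [h3]

lemma beer_neg (money : Int) (h : money < 0) : beer money = beer_alt money := by
  unfold beer beer_alt
  rw [PySem.List.pyRange_one_eq_nil (by omega)]
  have hm : PySem.Int.floordiv money 5 ≤ 0 := by
    have h1 : PySem.Int.floordiv money 5 < 1 :=
      (PySem.Int.floordiv_lt_iff_lt_mul (by norm_num)).mpr (by omega)
    omega
  simp only [List.foldl_nil]
  exact (if_pos hm).symm

-- ===== VERDICT (by name: the statement is the Claim_ definition above) =====
theorem beer_spec : Claim_equal_beer := by
  intro money _
  unfold Spec_beer
  by_cases h : 0 ≤ money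
  · obtain ⟨n, rfl⟩ := Int.eq_ofNat_of_zero_le h
    rw [beer_natCast, beer_alt_natCast]
  · exact beer_neg money (by omega)
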